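-- pv_equiv track=rewrite | github.com/ThiagoSob/Prova-PYDS---Revis-o-geral | Prova_aula7.py | producao_maxima_minima
-- ===== SOURCE A (Python) =====
-- def producao_maxima_minima(banco_de_dados):
--     total_por_ano = {}
--
--     for fazenda, culturas in banco_de_dados.items():
--         for cultura, anos in culturas.items():
--             for ano, producao in anos.items():
--                 if ano not in total_por_ano:
--                     total_por_ano[ano] = 0
--                 total_por_ano[ano] += producao
--
--     maximo = max(total_por_ano.items(), key=lambda item: item[1])[0]
--     minimo = min(total_por_ano.items(), key=lambda item: item[1])[0]
--     valor_maximo = max(total_por_ano.items(), key=lambda item: item[1])[1]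
--     valor_minimo = min(total_por_ano.items(), key=lambda item: item[1])[1]
--
--     return f' -Ano com Produção Máxima: {maximo}\n    -> Seu valor é: {valor_maximo} Ton\n -Ano com Produção Mínima: {minimo}\n    -> Seu valor é: {valor_minimo} Ton'
-- ===== SOURCE B (Python) =====
-- def producao_maxima_minima(banco_de_dados):
--     # No totals dict at all: flatten once, collect the distinct years in
--     # first-appearance order, and compute each year's total on demand by
--     # rescanning the flattened pairs; max/min pick years by that key.
--     pares = [par
--              for culturas in banco_de_dados.values()
--              for anos in culturas.values()
--              for par in anos.items()]
--     anos = []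
--     for ano, _ in pares:
--         if ano not in anos:
--             anos.append(ano)
--
--     def total(a):
--         return sum(p for ano, p in pares if ano == a)
--
--     maximo = max(anos, key=total)
--     minimo = min(anos, key=total)
--     return (f' -Ano com Produção Máxima: {maximo}\n    -> Seu valor é: {total(maximo)} Ton'
--             f'\n -Ano com Produção Mínima: {minimo}\n    -> Seu valor é: {total(minimo)} Ton')
-- ===== Notes on version B (the rewrite author's own statement) =====
-- stated objective: alternative
-- what changed: B builds no totals dictionary: it flattens the nested dicts into one pair list, dedups the years in first-appearance order, and computes each year's total on demand by rescanning that list, picking the extreme years with max/min keyed on that on-demand total (first-occurrence ties preserved); A aggregates into a dict and scans its items four times.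
import Mathlib
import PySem

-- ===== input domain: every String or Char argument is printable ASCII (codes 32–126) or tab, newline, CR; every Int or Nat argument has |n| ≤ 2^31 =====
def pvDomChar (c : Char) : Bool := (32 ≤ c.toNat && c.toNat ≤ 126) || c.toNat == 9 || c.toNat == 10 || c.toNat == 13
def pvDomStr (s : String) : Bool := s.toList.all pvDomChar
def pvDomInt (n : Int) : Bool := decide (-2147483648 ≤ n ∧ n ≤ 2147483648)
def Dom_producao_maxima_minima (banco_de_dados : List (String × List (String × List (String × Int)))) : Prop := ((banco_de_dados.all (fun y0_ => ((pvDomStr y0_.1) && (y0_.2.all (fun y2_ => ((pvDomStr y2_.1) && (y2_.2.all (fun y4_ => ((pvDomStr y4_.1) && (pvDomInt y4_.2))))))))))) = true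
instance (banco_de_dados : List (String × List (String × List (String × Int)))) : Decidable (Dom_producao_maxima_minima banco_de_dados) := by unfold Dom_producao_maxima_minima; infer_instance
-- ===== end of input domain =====

-- B drops A's totals dictionary entirely: it dedups the years in first-appearance order and
-- recomputes each year's total by rescanning the flattened pair list (objective: alternative).

-- ===== PORT A =====
-- the triple-nested accumulation loop of A
def pvTotalA (banco_de_dados : List (String × List (String × List (String × Int)))) :
    PySem.Dict String Int :=
  banco_de_dados.foldl (fun d fz =>
    fz.2.foldl (fun d cu =>
      cu.2.foldl (fun d ap =>
        let d1 := if d.contains ap.1 then d else d.insert ap.1 0   -- if ano not in total: total[ano] = 0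
        d1.insert ap.1 (d1.getD ap.1 0 + ap.2)) d) d)              -- total[ano] += producao
    PySem.Dict.empty

def producao_maxima_minima (banco_de_dados : List (String × List (String × List (String × Int)))) : String :=
  let total_por_ano := pvTotalA banco_de_dados
  -- the four max/min calls (the repeated calls return the same pair; none = ValueError, excluded by Pre_)
  match PySem.List.max? total_por_ano.items (fun item => item.2),
        PySem.List.min? total_por_ano.items (fun item => item.2) with
  | some mx, some mn =>
      " -Ano com Produção Máxima: " ++ mx.1 ++ "\n    -> Seu valor é: " ++ PySem.Int.toStr mx.2 ++
      " Ton\n -Ano com Produção Mínima: " ++ mn.1 ++ "\n    -> Seu valor é: " ++ PySem.Int.toStr mn.2 ++ " Ton"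
  | _, _ => ""

-- ===== PORT B =====
-- B's total(a): sum(p for ano, p in pares if ano == a)
def pvTotal (pares : List (String × Int)) (a : String) : Int :=
  ((pares.filter (fun p => p.1 == a)).map (fun p => p.2)).sum

def producao_maxima_minima_alt (banco_de_dados : List (String × List (String × List (String × Int)))) : String :=
  let pares := banco_de_dados.flatMap (fun fz => fz.2.flatMap (fun cu => cu.2))
  -- the `if ano not in anos: anos.append(ano)` loop
  let anos := pares.foldl (fun acc ap => if acc.contains ap.1 then acc else acc ++ [ap.1]) []
  match PySem.List.max? anos (pvTotal pares) with
  | none => ""   -- max([]) raises ValueError in B too; excluded by Pre_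
  | some mx =>
    match PySem.List.min? anos (pvTotal pares) with
    | none => ""
    | some mn =>
      " -Ano com Produção Máxima: " ++ mx ++ "\n    -> Seu valor é: " ++ PySem.Int.toStr (pvTotal pares mx) ++
      " Ton\n -Ano com Produção Mínima: " ++ mn ++ "\n    -> Seu valor é: " ++ PySem.Int.toStr (pvTotal pares mn) ++ " Ton"

-- ===== PRECONDITION & SPEC =====
-- Pre_ excludes association lists with duplicate keys at any level (the Python argument is a dict,
-- where such inputs cannot arise — a dict literal collapses them), and inputs with no
-- (year, production) entry at all, on which both A's max() and B's max() raise ValueError.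
def Pre_producao_maxima_minima (banco_de_dados : List (String × List (String × List (String × Int)))) : Prop :=
  (∃ fz ∈ banco_de_dados, ∃ cu ∈ fz.2, cu.2 ≠ []) ∧
  (banco_de_dados.map Prod.fst).Nodup ∧
  ∀ fz ∈ banco_de_dados, (fz.2.map Prod.fst).Nodup ∧ ∀ cu ∈ fz.2, (cu.2.map Prod.fst).Nodup
instance (banco_de_dados : List (String × List (String × List (String × Int)))) : Decidable (Pre_producao_maxima_minima banco_de_dados) := by unfold Pre_producao_maxima_minima; infer_instance

def pvWitness_producao_maxima_minima : (List (String × List (String × List (String × Int)))) :=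
  [("f", [("c", [("2020", (3 : Int)), ("2021", 1)])])]

def Spec_producao_maxima_minima (banco_de_dados : List (String × List (String × List (String × Int)))) (out : String) : Prop := out = producao_maxima_minima_alt banco_de_dados
instance (banco_de_dados : List (String × List (String × List (String × Int)))) (out : String) : Decidable (Spec_producao_maxima_minima banco_de_dados out) := by unfold Spec_producao_maxima_minima; infer_instance

-- ===== CLAIM (what is proved, stated in full; the proofs are below) =====
def Claim_equal_producao_maxima_minima : Prop := ∀ (banco_de_dados : List (String × List (String × List (String × Int)))), Dom_producao_maxima_minima banco_de_dados → Pre_producao_maxima_minima banco_de_dados → Spec_producao_maxima_minima banco_de_dados (producao_maxima_minima banco_de_dados)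

-- ===== LEMMAS AND PROOFS =====

-- A's guarded update "if missing insert 0 then add" is the single get-default-and-insert step
theorem pv_step_eq (d : PySem.Dict String Int) (k : String) (p : Int) :
    (let d1 := if d.contains k then d else d.insert k 0
     d1.insert k (d1.getD k 0 + p)) = d.insert k (d.getD k 0 + p) := by
  by_cases h : d.contains k
  · simp [h]
  · simp only [h, Bool.false_eq_true, ite_false]
    rw [PySem.Dict.getD_insert_self, PySem.Dict.insert_insert_self,
        PySem.Dict.getD_of_not_contains d 0 (by simpa using h), zero_add]

theorem pv_foldl_flatMap {α β γ : Type} (g : α → List β) (f : γ → β → γ) :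
    ∀ (xs : List α) (i : γ),
      (xs.flatMap g).foldl f i = xs.foldl (fun a x => (g x).foldl f a) i := by
  intro xs
  induction xs with
  | nil => intro i; rfl
  | cons h t ih => intro i; simp [List.flatMap_cons, List.foldl_append, ih]

-- A's triple aggregation loop is the single fold over the flattened pair list
theorem pv_total_eq (banco : List (String × List (String × List (String × Int)))) :
    pvTotalA banco =
      (banco.flatMap (fun fz => fz.2.flatMap (fun cu => cu.2))).foldl
        (fun d ap => d.insert ap.1 (d.getD ap.1 0 + ap.2)) PySem.Dict.empty := by
  rw [pv_foldl_flatMap]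
  unfold pvTotalA
  congr 1
  funext d fz
  rw [pv_foldl_flatMap]
  congr 1
  funext d cu
  simp only [pv_step_eq]

-- the items of A's accumulated dict are exactly B's deduped years paired with B's rescanned totals
theorem pv_items_char :
    ∀ (pares : List (String × Int)) (d : PySem.Dict String Int), d.keys.Nodup →
      (pares.foldl (fun d ap => d.insert ap.1 (d.getD ap.1 0 + ap.2)) d).items
      = (pares.foldl (fun acc ap => if acc.contains ap.1 then acc else acc ++ [ap.1]) d.keys).map
          (fun k => (k, d.getD k 0 + pvTotal pares k)) := by
  intro pares
  induction pares with
  | nil =>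
    intro d hnd
    simp only [List.foldl_nil]
    have hpt : ∀ p ∈ d.items, (fun k => (k, d.getD k 0 + pvTotal [] k)) p.1 = p := by
      intro p hp
      have := PySem.Dict.getD_of_mem_items (d := d) (k := p.1) (v := p.2)
        (by exact (Prod.mk.eta (p := p) ▸ hp)) hnd (0 : Int)
      simp [pvTotal, this]
    calc d.items = d.items.map id := by simp
      _ = d.items.map (fun p => (fun k => (k, d.getD k 0 + pvTotal [] k)) p.1) := by
            exact List.map_congr_left (fun p hp => ((hpt p hp).symm))
      _ = _ := by simp [PySem.Dict.keys, List.map_map, Function.comp]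
  | cons ap rest ih =>
    intro d hnd
    simp only [List.foldl_cons]
    rw [ih (d.insert ap.1 (d.getD ap.1 0 + ap.2)) (PySem.Dict.nodup_keys_insert _ _ _ hnd)]
    have hkeys : (d.insert ap.1 (d.getD ap.1 0 + ap.2)).keys
        = if d.keys.contains ap.1 then d.keys else d.keys ++ [ap.1] := by
      by_cases hc : d.contains ap.1
      · have hm : ap.1 ∈ d.keys := (PySem.Dict.contains_iff_mem_keys d ap.1).1 hc
        rw [PySem.Dict.keys_insert_of_contains _ _ hc,
          if_pos (List.elem_eq_true_of_mem hm)]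
      · have hm : ap.1 ∉ d.keys := fun h =>
          hc ((PySem.Dict.contains_iff_mem_keys d ap.1).2 h)
        rw [PySem.Dict.keys_insert_of_not_contains _ _ (by simpa using hc),
          if_neg (by simpa using hm)]
    rw [hkeys]
    congr 1
    funext k
    by_cases hk : k = ap.1
    · subst hk
      rw [PySem.Dict.getD_insert_self]
      simp [pvTotal, add_assoc]
    · rw [PySem.Dict.getD_insert_of_ne _ _ _ hk]
      have hne : (ap.1 == k) = false := by
        simp only [beq_eq_false_iff_ne, ne_eq]
        exact fun h => hk h.symm
      simp [pvTotal, hne]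

-- running-extremum form of max()/min() with a key on a nonempty list
theorem pv_foldl_some {α : Type} (f : α → α → α) :
    ∀ (t : List α) (a : α),
      t.foldl (fun acc x => match acc with
                 | none => some x
                 | some m => some (f m x)) (some a) = some (t.foldl f a) := by
  intro t
  induction t with
  | nil => intro a; rfl
  | cons h t ih => intro a; simpa using ih (f a h)

theorem pv_max?_cons {α κ : Type} [LT κ] [DecidableLT κ] (key : α → κ) (x : α) (t : List α) :
    PySem.List.max? (x :: t) key = some (t.foldl (fun m y => if key m < key y then y else m) x) := by
  simp only [PySem.List.max?, List.foldl_cons, ← apply_ite some]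
  exact pv_foldl_some _ t x

theorem pv_min?_cons {α κ : Type} [LT κ] [DecidableLT κ] (key : α → κ) (x : α) (t : List α) :
    PySem.List.min? (x :: t) key = some (t.foldl (fun m y => if key y < key m then y else m) x) := by
  simp only [PySem.List.min?, List.foldl_cons, ← apply_ite some]
  exact pv_foldl_some _ t x

-- the running max/min over the (year, total) pairs is the image of the running max/min over the years
theorem pv_foldl_max_map (f : String → String × Int) :
    ∀ (t : List String) (x : String),
      (t.map f).foldl (fun m y => if m.2 < y.2 then y else m) (f x)
      = f (t.foldl (fun m y => if (f m).2 < (f y).2 then y else m) x) := by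
  intro t
  induction t with
  | nil => intro x; rfl
  | cons h t ih =>
    intro x
    simp only [List.map_cons, List.foldl_cons]
    by_cases hlt : (f x).2 < (f h).2 <;> simp [hlt, ih]

theorem pv_foldl_min_map (f : String → String × Int) :
    ∀ (t : List String) (x : String),
      (t.map f).foldl (fun m y => if y.2 < m.2 then y else m) (f x)
      = f (t.foldl (fun m y => if (f y).2 < (f m).2 then y else m) x) := by
  intro t
  induction t with
  | nil => intro x; rfl
  | cons h t ih =>
    intro x
    simp only [List.map_cons, List.foldl_cons]
    by_cases hlt : (f h).2 < (f x).2 <;> simp [hlt, ih]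

-- ===== VERDICT (by name: the statement is the Claim_ definition above) =====
theorem producao_maxima_minima_spec : Claim_equal_producao_maxima_minima := by
  intro banco _ _
  unfold Spec_producao_maxima_minima producao_maxima_minima producao_maxima_minima_alt
  rw [pv_total_eq]
  have hitems := pv_items_char (banco.flatMap (fun fz => fz.2.flatMap (fun cu => cu.2)))
      PySem.Dict.empty PySem.Dict.nodup_keys_empty
  simp only [PySem.Dict.keys_empty, PySem.Dict.getD_empty, zero_add] at hitems
  cases hanos : (banco.flatMap (fun fz => fz.2.flatMap (fun cu => cu.2))).foldl
      (fun acc ap => if acc.contains ap.1 then acc else acc ++ [ap.1]) [] with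
  | nil =>
    rw [hanos] at hitems
    simp only [hitems, hanos, List.map_nil, PySem.List.max?, PySem.List.min?, List.foldl_nil]
  | cons x rest =>
    rw [hanos] at hitems
    simp only [hitems, hanos, List.map_cons, pv_max?_cons, pv_min?_cons]
    rw [pv_foldl_max_map (fun k => (k, pvTotal (banco.flatMap (fun fz => fz.2.flatMap (fun cu => cu.2))) k)) rest x,
        pv_foldl_min_map (fun k => (k, pvTotal (banco.flatMap (fun fz => fz.2.flatMap (fun cu => cu.2))) k)) rest x]
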